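-- pv_equiv track=rewrite | github.com/terry-liu-git/AI-Access-Security-Research | doomarena/osworld/src/doomarena/osworld/scripts/analyze_protected_resources.py | _infer_pattern_categories
-- ===== SOURCE A (Python) =====
-- from typing import Dict, Iterable, List, Optional, Tuple
--
-- def _infer_pattern_categories(patterns: List[str]) -> List[str]:
--     categories = set()
--     for pattern in patterns:
--         lowered = pattern.lower()
--         if "git push" in lowered:
--             categories.add("git_push")
--         if any(
--             item in lowered
--             for item in ("sudo ", "useradd", "chpasswd", "chmod 777", "rm -rf")
--         ):
--             categories.add("shell_admin")
--         if any(item in lowered for item in ("wget ", "curl ", "scp ", "ssh ", "pkill ")):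
--             categories.add("shell_shortcut")
--         if "chrome://settings/passwords" in lowered:
--             categories.add("browser_passwords")
--         if "chrome://settings/payments" in lowered:
--             categories.add("browser_payments")
--         if "chrome://settings/addresses" in lowered:
--             categories.add("browser_addresses")
--         if any(
--             item in lowered
--             for item in (
--                 "clearbrowserdata",
--                 "clear browsing data",
--                 "shift['\\\"],\\s*['\\\"]delete",
--             )
--         ):
--             categories.add("browser_clear_data")
--         if "pyautogui.press('delete')" in lowered or "press\\(['\\\"]delete" in lowered:
--             categories.add("delete_action")
--         if (
--             "pyautogui.hotkey('ctrl', 'x')" in lowered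
--             or "pyautogui.hotkey('ctrl', 'w')" in lowered
--             or "ctrl['\\\"],\\s*['\\\"](?:w|x)" in lowered
--         ):
--             categories.add("document_shortcut")
--         if (
--             "pyautogui.hotkey('alt', 't')" in lowered
--             or "account settings" in lowered
--             or "outgoing server" in lowered
--             or "smtp" in lowered
--         ):
--             categories.add("email_settings")
--     return sorted(categories)
-- ===== SOURCE B (Python) =====
-- # Labels listed in alphabetical order, so the comprehension emits the result
-- # already sorted and no set or final sort is needed.
-- _RULES = (
--     ("browser_addresses", ("chrome://settings/addresses",)),
--     ("browser_clear_data", ("clearbrowserdata", "clear browsing data", "shift['\\\"],\\s*['\\\"]delete")),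
--     ("browser_passwords", ("chrome://settings/passwords",)),
--     ("browser_payments", ("chrome://settings/payments",)),
--     ("delete_action", ("pyautogui.press('delete')", "press\\(['\\\"]delete")),
--     ("document_shortcut", ("pyautogui.hotkey('ctrl', 'x')", "pyautogui.hotkey('ctrl', 'w')", "ctrl['\\\"],\\s*['\\\"](?:w|x)")),
--     ("email_settings", ("pyautogui.hotkey('alt', 't')", "account settings", "outgoing server", "smtp")),
--     ("git_push", ("git push",)),
--     ("shell_admin", ("sudo ", "useradd", "chpasswd", "chmod 777", "rm -rf")),
--     ("shell_shortcut", ("wget ", "curl ", "scp ", "ssh ", "pkill ")),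
-- )
--
-- def _infer_pattern_categories(patterns):
--     lowereds = [p.lower() for p in patterns]
--     return [label for label, subs in _RULES
--             if any(sub in low for low in lowereds for sub in subs)]
-- ===== Notes on version B (the rewrite author's own statement) =====
-- stated objective: simpler
-- what changed: B inverts the traversal: instead of scanning patterns and accumulating labels in a set that is sorted at the end, it walks a rules table whose labels are listed alphabetically, keeps a category when any pattern contains one of its substrings, and so emits the result already sorted with no set and no sort.
import Mathlib
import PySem

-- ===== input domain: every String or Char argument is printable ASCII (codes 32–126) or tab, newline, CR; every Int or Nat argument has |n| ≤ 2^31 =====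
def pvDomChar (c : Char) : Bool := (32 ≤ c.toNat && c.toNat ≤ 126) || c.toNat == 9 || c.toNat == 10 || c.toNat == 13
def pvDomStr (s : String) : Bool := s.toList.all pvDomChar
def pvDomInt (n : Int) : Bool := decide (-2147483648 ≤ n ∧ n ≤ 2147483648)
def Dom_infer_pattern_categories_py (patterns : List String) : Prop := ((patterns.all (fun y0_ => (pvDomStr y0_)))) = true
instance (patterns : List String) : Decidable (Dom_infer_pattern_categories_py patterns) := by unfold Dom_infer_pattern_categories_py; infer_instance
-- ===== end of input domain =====

-- B drops A's set-and-sort: it scans the categories in alphabetical label order (outer loop over a rules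
-- table, inner scan over all patterns) and emits matching labels directly, already sorted (objective: simpler).

-- ===== PORT A =====
-- loop body of A's 'for pattern in patterns' (the ten if-branches, in A's order)
def pvStepA (categories : PySem.Set String) (pattern : String) : PySem.Set String :=
  let lowered := PySem.Str.lower pattern
  let categories := if PySem.Str.isIn "git push" lowered then categories.add "git_push" else categories
  let categories := if ["sudo ", "useradd", "chpasswd", "chmod 777", "rm -rf"].any (fun item => PySem.Str.isIn item lowered) then categories.add "shell_admin" else categories
  let categories := if ["wget ", "curl ", "scp ", "ssh ", "pkill "].any (fun item => PySem.Str.isIn item lowered) then categories.add "shell_shortcut" else categories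
  let categories := if PySem.Str.isIn "chrome://settings/passwords" lowered then categories.add "browser_passwords" else categories
  let categories := if PySem.Str.isIn "chrome://settings/payments" lowered then categories.add "browser_payments" else categories
  let categories := if PySem.Str.isIn "chrome://settings/addresses" lowered then categories.add "browser_addresses" else categories
  let categories := if ["clearbrowserdata", "clear browsing data", "shift['\\\"],\\s*['\\\"]delete"].any (fun item => PySem.Str.isIn item lowered) then categories.add "browser_clear_data" else categories
  let categories := if PySem.Str.isIn "pyautogui.press('delete')" lowered || PySem.Str.isIn "press\\(['\\\"]delete" lowered then categories.add "delete_action" else categories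
  let categories := if PySem.Str.isIn "pyautogui.hotkey('ctrl', 'x')" lowered || PySem.Str.isIn "pyautogui.hotkey('ctrl', 'w')" lowered || PySem.Str.isIn "ctrl['\\\"],\\s*['\\\"](?:w|x)" lowered then categories.add "document_shortcut" else categories
  let categories := if PySem.Str.isIn "pyautogui.hotkey('alt', 't')" lowered || PySem.Str.isIn "account settings" lowered || PySem.Str.isIn "outgoing server" lowered || PySem.Str.isIn "smtp" lowered then categories.add "email_settings" else categories
  categories

def infer_pattern_categories_py (patterns : List String) : List String :=
  PySem.List.sorted (patterns.foldl pvStepA PySem.Set.empty) (fun x => x) false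

-- ===== PORT B =====
-- B's _RULES table: labels in alphabetical order
def pvRules : List (String × List String) := [
  ("browser_addresses", ["chrome://settings/addresses"]),
  ("browser_clear_data", ["clearbrowserdata", "clear browsing data", "shift['\\\"],\\s*['\\\"]delete"]),
  ("browser_passwords", ["chrome://settings/passwords"]),
  ("browser_payments", ["chrome://settings/payments"]),
  ("delete_action", ["pyautogui.press('delete')", "press\\(['\\\"]delete"]),
  ("document_shortcut", ["pyautogui.hotkey('ctrl', 'x')", "pyautogui.hotkey('ctrl', 'w')", "ctrl['\\\"],\\s*['\\\"](?:w|x)"]),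
  ("email_settings", ["pyautogui.hotkey('alt', 't')", "account settings", "outgoing server", "smtp"]),
  ("git_push", ["git push"]),
  ("shell_admin", ["sudo ", "useradd", "chpasswd", "chmod 777", "rm -rf"]),
  ("shell_shortcut", ["wget ", "curl ", "scp ", "ssh ", "pkill "])]

def infer_pattern_categories_py_alt (patterns : List String) : List String :=
  let lowereds := patterns.map PySem.Str.lower
  (pvRules.filter (fun rule => lowereds.any (fun low => rule.2.any (fun sub => PySem.Str.isIn sub low)))).map (fun rule => rule.1)

-- ===== PRECONDITION & SPEC =====
def Spec_infer_pattern_categories_py (patterns : List String) (out : List String) : Prop := out = infer_pattern_categories_py_alt patterns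
instance (patterns : List String) (out : List String) : Decidable (Spec_infer_pattern_categories_py patterns out) := by unfold Spec_infer_pattern_categories_py; infer_instance

-- ===== CLAIM (what is proved, stated in full; the proofs are below) =====
def Claim_equal_infer_pattern_categories_py : Prop := ∀ (patterns : List String), Dom_infer_pattern_categories_py patterns → Spec_infer_pattern_categories_py patterns (infer_pattern_categories_py patterns)

-- ===== LEMMAS AND PROOFS =====
-- does pattern p trigger rule r?
def pvCond (p : String) (r : String × List String) : Bool :=
  r.2.any (fun sub => PySem.Str.isIn sub (PySem.Str.lower p))

-- does any of the patterns trigger rule r?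
def pvTrig (patterns : List String) (r : String × List String) : Bool :=
  patterns.any (fun p => pvCond p r)

theorem pv_mem_ite_add (c : Bool) (s : PySem.Set String) (l x : String) :
    (x ∈ (if c then PySem.Set.add s l else s)) ↔ x ∈ s ∨ (c = true ∧ x = l) := by
  cases c <;> simp [PySem.Set.mem_add]

theorem pv_nodup_ite_add (c : Bool) (s : PySem.Set String) (l : String) (h : s.Nodup) :
    (if c then PySem.Set.add s l else s).Nodup := by
  cases c
  · simpa using h
  · simpa using PySem.Set.nodup_add s l h

theorem pv_nodup_stepA (s : PySem.Set String) (p : String) (h : s.Nodup) : (pvStepA s p).Nodup := by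
  unfold pvStepA
  exact pv_nodup_ite_add _ _ _ (pv_nodup_ite_add _ _ _ (pv_nodup_ite_add _ _ _
    (pv_nodup_ite_add _ _ _ (pv_nodup_ite_add _ _ _ (pv_nodup_ite_add _ _ _
    (pv_nodup_ite_add _ _ _ (pv_nodup_ite_add _ _ _ (pv_nodup_ite_add _ _ _
    (pv_nodup_ite_add _ _ _ h)))))))))

theorem pv_nodup_foldA (patterns : List String) (s : PySem.Set String) (h : s.Nodup) :
    (patterns.foldl pvStepA s).Nodup := by
  induction patterns generalizing s with
  | nil => exact h
  | cons p ps ih => exact ih _ (pv_nodup_stepA s p h)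

-- one step of A adds exactly the labels of the rules that p triggers
theorem pv_mem_stepA (s : PySem.Set String) (p : String) (x : String) :
    x ∈ pvStepA s p ↔ x ∈ s ∨ ∃ r ∈ pvRules, pvCond p r = true ∧ x = r.1 := by
  unfold pvStepA
  simp only [pv_mem_ite_add]
  constructor
  · rintro ((((((((((h|h)|h)|h)|h)|h)|h)|h)|h)|h)|h)
    · exact Or.inl h
    · exact Or.inr ⟨("git_push", ["git push"]), by simp [pvRules], by simpa [pvCond, List.any_cons, List.any_nil, Bool.or_false, Bool.or_assoc] using h.1, h.2⟩
    · exact Or.inr ⟨("shell_admin", ["sudo ", "useradd", "chpasswd", "chmod 777", "rm -rf"]), by simp [pvRules], by simpa [pvCond, List.any_cons, List.any_nil, Bool.or_false, Bool.or_assoc] using h.1, h.2⟩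
    · exact Or.inr ⟨("shell_shortcut", ["wget ", "curl ", "scp ", "ssh ", "pkill "]), by simp [pvRules], by simpa [pvCond, List.any_cons, List.any_nil, Bool.or_false, Bool.or_assoc] using h.1, h.2⟩
    · exact Or.inr ⟨("browser_passwords", ["chrome://settings/passwords"]), by simp [pvRules], by simpa [pvCond, List.any_cons, List.any_nil, Bool.or_false, Bool.or_assoc] using h.1, h.2⟩
    · exact Or.inr ⟨("browser_payments", ["chrome://settings/payments"]), by simp [pvRules], by simpa [pvCond, List.any_cons, List.any_nil, Bool.or_false, Bool.or_assoc] using h.1, h.2⟩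
    · exact Or.inr ⟨("browser_addresses", ["chrome://settings/addresses"]), by simp [pvRules], by simpa [pvCond, List.any_cons, List.any_nil, Bool.or_false, Bool.or_assoc] using h.1, h.2⟩
    · exact Or.inr ⟨("browser_clear_data", ["clearbrowserdata", "clear browsing data", "shift['\\\"],\\s*['\\\"]delete"]), by simp [pvRules], by simpa [pvCond, List.any_cons, List.any_nil, Bool.or_false, Bool.or_assoc] using h.1, h.2⟩
    · exact Or.inr ⟨("delete_action", ["pyautogui.press('delete')", "press\\(['\\\"]delete"]), by simp [pvRules], by simpa [pvCond, List.any_cons, List.any_nil, Bool.or_false, Bool.or_assoc] using h.1, h.2⟩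
    · exact Or.inr ⟨("document_shortcut", ["pyautogui.hotkey('ctrl', 'x')", "pyautogui.hotkey('ctrl', 'w')", "ctrl['\\\"],\\s*['\\\"](?:w|x)"]), by simp [pvRules], by simpa [pvCond, List.any_cons, List.any_nil, Bool.or_false, Bool.or_assoc] using h.1, h.2⟩
    · exact Or.inr ⟨("email_settings", ["pyautogui.hotkey('alt', 't')", "account settings", "outgoing server", "smtp"]), by simp [pvRules], by simpa [pvCond, List.any_cons, List.any_nil, Bool.or_false, Bool.or_assoc] using h.1, h.2⟩
  · rintro (h | ⟨r, hr, hc, he⟩)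
    · exact Or.inl (Or.inl (Or.inl (Or.inl (Or.inl (Or.inl (Or.inl (Or.inl (Or.inl (Or.inl h)))))))))
    simp only [pvRules, List.mem_cons, List.not_mem_nil, or_false] at hr
    rcases hr with h1|h1|h1|h1|h1|h1|h1|h1|h1|h1
    · subst h1
      exact Or.inl (Or.inl (Or.inl (Or.inl (Or.inr ⟨by simpa [pvCond, List.any_cons, List.any_nil, Bool.or_false, Bool.or_assoc] using hc, he⟩))))
    · subst h1
      exact Or.inl (Or.inl (Or.inl (Or.inr ⟨by simpa [pvCond, List.any_cons, List.any_nil, Bool.or_false, Bool.or_assoc] using hc, he⟩)))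
    · subst h1
      exact Or.inl (Or.inl (Or.inl (Or.inl (Or.inl (Or.inl (Or.inr ⟨by simpa [pvCond, List.any_cons, List.any_nil, Bool.or_false, Bool.or_assoc] using hc, he⟩))))))
    · subst h1
      exact Or.inl (Or.inl (Or.inl (Or.inl (Or.inl (Or.inr ⟨by simpa [pvCond, List.any_cons, List.any_nil, Bool.or_false, Bool.or_assoc] using hc, he⟩)))))
    · subst h1
      exact Or.inl (Or.inl (Or.inr ⟨by simpa [pvCond, List.any_cons, List.any_nil, Bool.or_false, Bool.or_assoc] using hc, he⟩))
    · subst h1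
      exact Or.inl (Or.inr ⟨by simpa [pvCond, List.any_cons, List.any_nil, Bool.or_false, Bool.or_assoc] using hc, he⟩)
    · subst h1
      exact Or.inr ⟨by simpa [pvCond, List.any_cons, List.any_nil, Bool.or_false, Bool.or_assoc] using hc, he⟩
    · subst h1
      exact Or.inl (Or.inl (Or.inl (Or.inl (Or.inl (Or.inl (Or.inl (Or.inl (Or.inl (Or.inr ⟨by simpa [pvCond, List.any_cons, List.any_nil, Bool.or_false, Bool.or_assoc] using hc, he⟩)))))))))
    · subst h1
      exact Or.inl (Or.inl (Or.inl (Or.inl (Or.inl (Or.inl (Or.inl (Or.inl (Or.inr ⟨by simpa [pvCond, List.any_cons, List.any_nil, Bool.or_false, Bool.or_assoc] using hc, he⟩))))))))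
    · subst h1
      exact Or.inl (Or.inl (Or.inl (Or.inl (Or.inl (Or.inl (Or.inl (Or.inr ⟨by simpa [pvCond, List.any_cons, List.any_nil, Bool.or_false, Bool.or_assoc] using hc, he⟩)))))))

-- membership in A's accumulated set over the whole list
theorem pv_mem_foldA (patterns : List String) (s : PySem.Set String) (x : String) :
    x ∈ patterns.foldl pvStepA s ↔ x ∈ s ∨ ∃ r ∈ pvRules, pvTrig patterns r = true ∧ x = r.1 := by
  induction patterns generalizing s with
  | nil => simp [pvTrig]
  | cons p ps ih =>
    rw [List.foldl_cons, ih, pv_mem_stepA]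
    have htrig : ∀ r, pvTrig (p :: ps) r = (pvCond p r || pvTrig ps r) := fun r => by
      simp [pvTrig, List.any_cons]
    constructor
    · rintro ((h | ⟨r, hr, hc, he⟩) | ⟨r, hr, hc, he⟩)
      · exact Or.inl h
      · exact Or.inr ⟨r, hr, by rw [htrig, hc, Bool.true_or], he⟩
      · exact Or.inr ⟨r, hr, by rw [htrig, hc, Bool.or_true], he⟩
    · rintro (h | ⟨r, hr, hc, he⟩)
      · exact Or.inl (Or.inl h)
      · rw [htrig] at hc
        rcases (Bool.or_eq_true _ _).mp hc with h1 | h1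
        · exact Or.inl (Or.inr ⟨r, hr, h1, he⟩)
        · exact Or.inr ⟨r, hr, h1, he⟩

-- B's filter predicate is pvTrig
theorem pv_filter_pred_eq (patterns : List String) (r : String × List String) :
    ((patterns.map PySem.Str.lower).any (fun low => r.2.any (fun sub => PySem.Str.isIn sub low)))
      = pvTrig patterns r := by
  simp [pvTrig, pvCond, List.any_map, Function.comp_def, pysem]

-- B's output is strictly increasing (labels in pvRules are alphabetical)
theorem pv_B_pairwise (q : String × List String → Bool) :
    ((pvRules.filter q).map (fun r => r.1)).Pairwise (· < ·) := by
  have hsub : ((pvRules.filter q).map (fun r => r.1)).Sublist (pvRules.map (fun r => r.1)) :=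
    (List.filter_sublist (p := q) (l := pvRules)).map _
  have hpw : (pvRules.map (fun r => (r.1 : String))).Pairwise (· < ·) := by
    apply List.IsChain.pairwise
    simp only [pvRules, List.map_cons, List.map_nil, List.isChain_cons_cons,
      List.isChain_singleton, and_true]
    refine ⟨?_, ?_, ?_, ?_, ?_, ?_, ?_, ?_, ?_⟩ <;> (rw [String.lt_iff_toList_lt]; decide)
  exact hpw.sublist hsub

-- ===== VERDICT (by name: the statement is the Claim_ definition above) =====
theorem infer_pattern_categories_py_spec : Claim_equal_infer_pattern_categories_py := by
  intro patterns _
  unfold Spec_infer_pattern_categories_py infer_pattern_categories_py infer_pattern_categories_py_alt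
  have hq : (fun rule : String × List String =>
      (patterns.map PySem.Str.lower).any (fun low => rule.2.any (fun sub => PySem.Str.isIn sub low)))
      = (fun rule => pvTrig patterns rule) := funext fun r => pv_filter_pred_eq patterns r
  simp only [hq]
  set L := (pvRules.filter (fun rule => pvTrig patterns rule)).map (fun r => r.1) with hL
  have hpwL : L.Pairwise (· < ·) := pv_B_pairwise _
  have hndL : L.Nodup := hpwL.imp ne_of_lt
  have hndS : (patterns.foldl pvStepA PySem.Set.empty).Nodup :=
    pv_nodup_foldA patterns _ (by simp [PySem.Set.empty])
  have hmem : ∀ x, x ∈ L ↔ x ∈ patterns.foldl pvStepA PySem.Set.empty := by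
    intro x
    rw [pv_mem_foldA]
    simp only [hL, List.mem_map, List.mem_filter, PySem.Set.empty, List.not_mem_nil, false_or]
    constructor
    · rintro ⟨r, ⟨hr, ht⟩, he⟩; exact ⟨r, hr, ht, he.symm⟩
    · rintro ⟨r, hr, ht, he⟩; exact ⟨r, ⟨hr, ht⟩, he.symm⟩
  have hperm : L.Perm (patterns.foldl pvStepA PySem.Set.empty) :=
    (List.perm_ext_iff_of_nodup hndL hndS).mpr hmem
  exact PySem.List.sorted_eq_of_perm_of_pairwise_lt _ _ _ hperm hpwL
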